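-- pv_equiv track=rewrite | github.com/leochiang0804/RPS_mind_game | ai_coach_metrics.py | _get_longest_streak
-- ===== SOURCE A (Python) =====
-- from typing import Dict, List, Any, Optional, Tuple
--
-- def _get_longest_streak(results: List[str], outcome: str) -> int:
--     """Get longest streak of specific outcome"""
--     if not results:
--         return 0
--
--     max_streak = 0
--     current_streak = 0
--
--     for result in results:
--         if result == outcome:
--             current_streak += 1
--             max_streak = max(max_streak, current_streak)
--         else:
--             current_streak = 0
--
--     return max_streak
-- ===== SOURCE B (Python) =====
-- from itertools import groupby
--
-- def _get_longest_streak(results, outcome):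
--     """Get longest streak of specific outcome"""
--     return max((sum(1 for _ in g) for k, g in groupby(results) if k == outcome),
--                default=0)
-- ===== Notes on version B (the rewrite author's own statement) =====
-- stated objective: idiomatic
-- what changed: Replaces the manual counter/maximum loop with itertools.groupby: the list is first split into maximal runs and the maximum length of runs equal to outcome is taken, with default=0 covering empty input and no match.
import Mathlib
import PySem

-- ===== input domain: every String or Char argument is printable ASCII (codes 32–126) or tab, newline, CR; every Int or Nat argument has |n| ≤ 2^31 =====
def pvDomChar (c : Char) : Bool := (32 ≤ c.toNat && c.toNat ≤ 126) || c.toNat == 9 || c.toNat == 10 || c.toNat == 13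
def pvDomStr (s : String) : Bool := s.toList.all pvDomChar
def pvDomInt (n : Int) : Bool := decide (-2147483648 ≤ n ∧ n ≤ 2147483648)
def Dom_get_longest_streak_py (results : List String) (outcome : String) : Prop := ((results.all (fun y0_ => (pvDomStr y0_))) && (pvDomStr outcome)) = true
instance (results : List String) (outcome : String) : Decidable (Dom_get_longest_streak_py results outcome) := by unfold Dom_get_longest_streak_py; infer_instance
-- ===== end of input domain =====

-- B replaces A's manual counter/maximum loop with a group-into-runs-then-reduce decomposition (idiomatic, same cost).


-- ===== PORT A =====
-- literal port of A: early return on empty, then one pass threading (max_streak, current_streak)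
def get_longest_streak_py (results : List String) (outcome : String) : Int :=
  if results = [] then 0
  else
    (results.foldl
      (fun (s : Int × Int) result =>
        if result = outcome then (max s.1 (s.2 + 1), s.2 + 1) else (s.1, 0))
      (0, 0)).1

-- ===== PORT B =====
-- groupby(results): split into maximal runs of equal elements, left to right, as (key, run-length) pairs
def pvGoRuns (k : String) (n : Int) : List String → List (String × Int)
  | [] => [(k, n)]
  | x :: xs => if x = k then pvGoRuns k (n + 1) xs else (k, n) :: pvGoRuns x 1 xs

def pvRunsB : List String → List (String × Int)
  | [] => []
  | x :: xs => pvGoRuns x 1 xs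

-- max over the lengths of runs whose key equals outcome, default 0
def get_longest_streak_py_alt (results : List String) (outcome : String) : Int :=
  (pvRunsB results).foldl (fun m kn => if kn.1 = outcome then max m kn.2 else m) 0

-- ===== PRECONDITION & SPEC =====
def Spec_get_longest_streak_py (results : List String) (outcome : String) (out : Int) : Prop := out = get_longest_streak_py_alt results outcome
instance (results : List String) (outcome : String) (out : Int) : Decidable (Spec_get_longest_streak_py results outcome out) := by unfold Spec_get_longest_streak_py; infer_instance

-- ===== CLAIM (what is proved, stated in full; the proofs are below) =====
def Claim_equal_get_longest_streak_py : Prop := ∀ (results : List String) (outcome : String), Dom_get_longest_streak_py results outcome → Spec_get_longest_streak_py results outcome (get_longest_streak_py results outcome)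

-- ===== LEMMAS AND PROOFS =====

-- "best streak in xs given current streak c" (A's m is updated as the streak grows, so c itself is not counted)
def pvBest (outcome : String) : Int → List String → Int
  | _, [] => 0
  | c, x :: xs => if x = outcome then max (c + 1) (pvBest outcome (c + 1) xs) else pvBest outcome 0 xs

theorem pvFoldA (outcome : String) (xs : List String) (m c : Int) (hm : 0 ≤ m) :
    (xs.foldl
      (fun (s : Int × Int) result =>
        if result = outcome then (max s.1 (s.2 + 1), s.2 + 1) else (s.1, 0))
      (m, c)).1 = max m (pvBest outcome c xs) := by
  induction xs generalizing m c with
  | nil => simp [pvBest, max_eq_left hm]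
  | cons x xs ih =>
    simp only [List.foldl_cons, pvBest]
    by_cases h : x = outcome
    · simp only [h, if_true]
      rw [ih _ _ (le_max_of_le_left hm), max_assoc]
    · simp only [if_neg h]
      exact ih _ _ hm

theorem pvFoldB (outcome : String) (xs : List String) (k : String) (n m : Int)
    (hm : 0 ≤ m) (hn : 0 ≤ n) :
    (pvGoRuns k n xs).foldl (fun m kn => if kn.1 = outcome then max m kn.2 else m) m
      = if k = outcome then max m (max n (pvBest outcome n xs))
        else max m (pvBest outcome 0 xs) := by
  induction xs generalizing k n m with
  | nil =>
    simp only [pvGoRuns, pvBest, List.foldl_cons, List.foldl_nil]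
    split
    · omega
    · omega
  | cons x xs ih =>
    simp only [pvGoRuns]
    by_cases hxk : x = k
    · simp only [if_pos hxk]
      rw [ih k (n + 1) m hm (by omega)]
      by_cases hk : k = outcome
      · simp only [if_pos hk, pvBest, hxk.trans hk, if_true]
        omega
      · have hxo : ¬ x = outcome := by rw [hxk]; exact hk
        simp only [if_neg hk, pvBest, if_neg hxo]
    · simp only [if_neg hxk, List.foldl_cons]
      by_cases hk : k = outcome
      · have hxo : ¬ x = outcome := fun h => hxk (h.trans hk.symm)
        simp only [if_pos hk]
        rw [ih x 1 (max m n) (le_max_of_le_left hm) (by omega), if_neg hxo]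
        simp only [pvBest, if_neg hxo]
        rw [max_assoc]
      · simp only [if_neg hk]
        rw [ih x 1 m hm (by omega)]
        by_cases hxo : x = outcome
        · simp only [if_pos hxo, pvBest]
          norm_num
        · simp only [if_neg hxo, pvBest]

-- ===== VERDICT (by name: the statement is the Claim_ definition above) =====
theorem get_longest_streak_py_spec : Claim_equal_get_longest_streak_py := by
  intro results outcome _
  unfold Spec_get_longest_streak_py get_longest_streak_py get_longest_streak_py_alt
  cases results with
  | nil => simp [pvRunsB]
  | cons x xs =>
    simp only [pvRunsB, if_neg (List.cons_ne_nil x xs), List.foldl_cons]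
    rw [pvFoldB outcome xs x 1 0 le_rfl (by omega)]
    by_cases hxo : x = outcome
    · simp only [if_pos hxo]
      rw [pvFoldA outcome xs (max 0 (0 + 1)) (0 + 1) (by omega)]
      norm_num
    · simp only [if_neg hxo]
      rw [pvFoldA outcome xs 0 0 le_rfl]
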